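-- pv_equiv track=rewrite | github.com/nikhilmole/Python_Program_1 | Program44.py | DisplayDigits
-- ===== SOURCE A (Python) =====
-- def DisplayDigits(iNum):
--     Digit = 0
--
--     while(iNum > 0):
--         Digit = 0
--         Digit = iNum % 10
--         iNum = iNum // 10
--         if(Digit == 0):
--             return True
-- ===== SOURCE B (Python) =====
-- def DisplayDigits(iNum):
--     if iNum > 0 and '0' in str(iNum):
--         return True
-- ===== Notes on version B (the rewrite author's own statement) =====
-- stated objective: idiomatic
-- what changed: B tests '0' in str(iNum) on the decimal string instead of A's while-loop that extracts digits with % and // one by one.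
import Mathlib
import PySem

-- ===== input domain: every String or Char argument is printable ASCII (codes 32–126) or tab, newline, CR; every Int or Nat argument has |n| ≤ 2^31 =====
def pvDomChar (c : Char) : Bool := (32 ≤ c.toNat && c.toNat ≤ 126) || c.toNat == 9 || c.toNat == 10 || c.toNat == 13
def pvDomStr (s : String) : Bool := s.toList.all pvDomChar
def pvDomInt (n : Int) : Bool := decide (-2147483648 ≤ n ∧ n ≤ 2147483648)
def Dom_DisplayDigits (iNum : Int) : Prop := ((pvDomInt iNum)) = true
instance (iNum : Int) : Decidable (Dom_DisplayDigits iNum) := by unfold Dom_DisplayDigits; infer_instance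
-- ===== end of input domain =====

-- B replaces A's arithmetic digit-extraction loop by the idiomatic test `'0' in str(iNum)` (string membership); same return values everywhere.

-- ===== PORT A =====
-- the while-loop of A: while iNum > 0: Digit = iNum % 10; iNum = iNum // 10; if Digit == 0: return True
def pvLoopA (iNum : Int) : Option Bool :=
  if _h : iNum > 0 then
    let Digit := PySem.Int.mod iNum 10
    let iNum' := PySem.Int.floordiv iNum 10
    if Digit = 0 then some true else pvLoopA iNum'
  else none
termination_by iNum.toNat
decreasing_by
  rw [PySem.Int.floordiv_eq_ediv_of_pos (by norm_num)]
  omega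

def DisplayDigits (iNum : Int) : Option Bool := pvLoopA iNum

-- ===== PORT B =====
def DisplayDigits_alt (iNum : Int) : Option Bool :=
  if decide (iNum > 0) && PySem.Str.isIn "0" (PySem.Int.toStr iNum) then some true else none

-- ===== PRECONDITION & SPEC =====
def Spec_DisplayDigits (iNum : Int) (out : Option Bool) : Prop := out = DisplayDigits_alt iNum
instance (iNum : Int) (out : Option Bool) : Decidable (Spec_DisplayDigits iNum out) := by unfold Spec_DisplayDigits; infer_instance

-- ===== CLAIM (what is proved, stated in full; the proofs are below) =====
def Claim_equal_DisplayDigits : Prop := ∀ (iNum : Int), Dom_DisplayDigits iNum → Spec_DisplayDigits iNum (DisplayDigits iNum)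

-- ===== LEMMAS AND PROOFS =====

-- '0' occurs among the decimal digits of n (recursion on n / 10)
def pvHz (n : Nat) : Bool :=
  if h : n / 10 = 0 then n % 10 == 0
  else (n % 10 == 0) || pvHz (n / 10)
termination_by n
decreasing_by omega

theorem pvDigitChar_eq_zero (m : Nat) (h : m < 10) : Nat.digitChar m = '0' ↔ m = 0 := by
  interval_cases m <;> simp [Nat.digitChar]

theorem pvToDigitsCore_mem (f : Nat) : ∀ (n : Nat) (ds : List Char), 0 < n → n < 10 ^ f →
    ('0' ∈ Nat.toDigitsCore 10 f n ds ↔ (pvHz n = true ∨ '0' ∈ ds)) := by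
  induction f with
  | zero => intro n ds hn h; omega
  | succ f ih =>
    intro n ds hn h
    rw [Nat.toDigitsCore]
    have hch : ('0' = (n % 10).digitChar) ↔ n % 10 = 0 := by
      rw [eq_comm]; exact pvDigitChar_eq_zero _ (by omega)
    by_cases h10 : n / 10 = 0
    · rw [if_pos h10]
      rw [pvHz, dif_pos h10]
      simp only [List.mem_cons, hch, beq_iff_eq]
    · rw [if_neg h10]
      rw [ih (n / 10) _ (by omega) (Nat.div_lt_of_lt_mul (by rw [← pow_succ']; exact h))]
      conv_rhs => rw [pvHz]
      rw [dif_neg h10]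
      simp only [List.mem_cons, hch, beq_iff_eq, Bool.or_eq_true]
      tauto

theorem pvLoopA_eq_aux (k : Nat) : ∀ (n : Int), n.toNat ≤ k →
    pvLoopA n = (if 0 < n ∧ pvHz n.toNat = true then some true else none) := by
  induction k with
  | zero =>
    intro n hk
    rw [pvLoopA, dif_neg (by omega)]
    rw [if_neg (by omega)]
  | succ k ih =>
    intro n hk
    by_cases h : n > 0
    · rw [pvLoopA, dif_pos h]
      show (if PySem.Int.mod n 10 = 0 then some true
            else pvLoopA (PySem.Int.floordiv n 10)) = _
      have hmod : PySem.Int.mod n 10 = n % 10 := PySem.Int.mod_eq_emod_of_pos (by norm_num)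
      have hdiv : PySem.Int.floordiv n 10 = n / 10 := PySem.Int.floordiv_eq_ediv_of_pos (by norm_num)
      by_cases hd : PySem.Int.mod n 10 = 0
      · rw [if_pos hd, if_pos]
        refine ⟨h, ?_⟩
        have : n.toNat % 10 = 0 := by omega
        rw [pvHz]; split <;> simp [this]
      · rw [if_neg hd, hdiv, ih (n / 10) (by omega)]
        conv_rhs => rw [pvHz]
        have hne : ¬ (n.toNat % 10 == 0) = true := by simp; omega
        by_cases hz : n.toNat / 10 = 0
        · rw [dif_pos hz]
          have h1 : ¬ (0 < n / 10) := by omega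
          simp [h1, hne]
        · rw [dif_neg hz]
          have h1 : (n / 10).toNat = n.toNat / 10 := by omega
          have h2 : 0 < n / 10 := by omega
          simp [h1, h2, hne, h]
    · rw [pvLoopA, dif_neg h, if_neg (by omega)]

theorem pvAlt_eq (n : Int) (h : 0 < n) :
    DisplayDigits_alt n = (if pvHz n.toNat = true then some true else none) := by
  unfold DisplayDigits_alt
  have hiff : PySem.Str.isIn "0" (PySem.Int.toStr n) = true ↔ pvHz n.toNat = true := by
    rw [PySem.Str.isIn_iff_infix, PySem.Int.toList_toStr]
    unfold PySem.Int.toChars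
    rw [if_neg (by omega)]
    show ('0' : Char) :: [] <:+: _ ↔ _
    rw [List.singleton_infix_iff]
    unfold Nat.toDigits
    rw [pvToDigitsCore_mem (n.toNat + 1) n.toNat [] (by omega)
      (lt_of_lt_of_le (Nat.lt_pow_self (by norm_num)) (Nat.pow_le_pow_right (by norm_num) (by omega)))]
    simp
  by_cases hz : pvHz n.toNat = true
  · rw [hiff.mpr hz]
    simp [h, hz]
  · rw [if_neg hz, if_neg]
    simp only [Bool.and_eq_true, decide_eq_true_eq]
    intro hc
    exact hz (hiff.mp hc.2)

-- ===== VERDICT (by name: the statement is the Claim_ definition above) =====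
theorem DisplayDigits_spec : Claim_equal_DisplayDigits := by
  intro n _
  unfold Spec_DisplayDigits DisplayDigits
  rw [pvLoopA_eq_aux n.toNat n (le_refl _)]
  by_cases h : 0 < n
  · rw [pvAlt_eq n h]
    by_cases hz : pvHz n.toNat = true <;> simp [h, hz]
  · have halt : DisplayDigits_alt n = none := by
      unfold DisplayDigits_alt
      simp [h]
    simp [h, halt]
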